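-- pv_equiv track=rewrite | github.com/ug-kitamura/AdventCode2022 | 18/work.py | calc_x
-- ===== SOURCE A (Python) =====
-- def calc_x(x_map):
-- 	area_count = 0
-- 	if len(x_map) == 1:
-- 		area_count = 6
-- 	else:
-- 		area_count = 6
-- 		for i in range(len(x_map)-1):
-- 			area_count += 6
-- 			if abs(x_map[i]-x_map[i+1]) == 0:
-- 				area_count -= 6
-- 			elif abs(x_map[i]-x_map[i+1]) == 1:
-- 				area_count -= 2
-- 	return area_count
-- ===== SOURCE B (Python) =====
-- def calc_x(x_map):
--     # divide and conquer: surface of the whole = surface of each half,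
--     # minus the faces shared at the junction between the halves
--     if len(x_map) <= 1:
--         return 6
--     mid = len(x_map) // 2
--     left, right = x_map[:mid], x_map[mid:]
--     d = abs(left[-1] - right[0])
--     shared = 6 if d == 0 else 2 if d == 1 else 0
--     return calc_x(left) + calc_x(right) - shared
-- ===== Notes on version B (the rewrite author's own statement) =====
-- stated objective: alternative
-- what changed: Replaces the single indexed accumulator loop with a divide-and-conquer recursion: split the list in half, compute each half's surface recursively, and merge by subtracting the faces shared at the junction pair.
import Mathlib
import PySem

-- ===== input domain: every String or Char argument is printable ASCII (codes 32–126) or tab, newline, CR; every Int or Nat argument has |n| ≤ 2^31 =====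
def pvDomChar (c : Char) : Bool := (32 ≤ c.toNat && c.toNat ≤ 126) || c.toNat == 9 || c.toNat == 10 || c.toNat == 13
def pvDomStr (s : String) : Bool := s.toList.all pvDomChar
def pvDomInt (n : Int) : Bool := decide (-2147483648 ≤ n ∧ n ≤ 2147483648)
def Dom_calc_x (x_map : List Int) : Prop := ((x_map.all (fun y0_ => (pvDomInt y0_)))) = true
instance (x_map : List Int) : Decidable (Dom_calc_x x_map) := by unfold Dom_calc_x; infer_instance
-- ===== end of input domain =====

-- B replaces the indexed accumulator loop by divide-and-conquer: surface of each half, minus the faces shared at the junction (alternative decomposition, same results).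

-- ===== PORT A =====
def calc_x (x_map : List Int) : Int :=
  if x_map.length = 1 then 6
  else
    (PySem.List.pyRange 0 ((x_map.length : Int) - 1) 1).foldl
      (fun acc i =>
        let acc := acc + 6
        if (PySem.List.pyGetD x_map i 0 - PySem.List.pyGetD x_map (i + 1) 0).natAbs = 0 then
          acc - 6
        else if (PySem.List.pyGetD x_map i 0 - PySem.List.pyGetD x_map (i + 1) 0).natAbs = 1 then
          acc - 2
        else acc) 6

-- ===== PORT B =====
-- left[-1] / right[0] are ported as getLastD 0 / headD 0, exact here because both halves are nonempty when the branch is taken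
def calc_x_alt (x_map : List Int) : Int :=
  if x_map.length ≤ 1 then 6
  else
    let mid := x_map.length / 2
    let left := x_map.take mid
    let right := x_map.drop mid
    let d := (left.getLastD 0 - right.headD 0).natAbs
    let shared : Int := if d = 0 then 6 else if d = 1 then 2 else 0
    calc_x_alt left + calc_x_alt right - shared
termination_by x_map.length
decreasing_by
  · simp only [List.length_take]; omega
  · simp only [List.length_drop]; omega

-- ===== PRECONDITION & SPEC =====
def Spec_calc_x (x_map : List Int) (out : Int) : Prop := out = calc_x_alt x_map
instance (x_map : List Int) (out : Int) : Decidable (Spec_calc_x x_map out) := by unfold Spec_calc_x; infer_instance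

-- ===== CLAIM (what is proved, stated in full; the proofs are below) =====
def Claim_equal_calc_x : Prop := ∀ (x_map : List Int), Dom_calc_x x_map → Spec_calc_x x_map (calc_x x_map)

-- ===== LEMMAS AND PROOFS =====

-- shared-face weight of one adjacent pair
def pairW (p : Int × Int) : Int :=
  if (p.1 - p.2).natAbs = 0 then 6 else if (p.1 - p.2).natAbs = 1 then 2 else 0

-- adjacent pairs of a list
def pairs : List Int → List (Int × Int)
  | [] => []
  | [_] => []
  | x :: y :: t => (x, y) :: pairs (y :: t)

-- the common characterisation: 6 + Σ over adjacent pairs of (6 - weight)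
def surf (xs : List Int) : Int := 6 + ((pairs xs).map (fun p => 6 - pairW p)).sum

theorem pairs_cons (x : Int) (r : List Int) (hr : r ≠ []) :
    pairs (x :: r) = (x, r.headD 0) :: pairs r := by
  cases r with
  | nil => exact absurd rfl hr
  | cons y t => simp [pairs]

theorem pairs_append (L R : List Int) (hL : L ≠ []) (hR : R ≠ []) :
    pairs (L ++ R) = pairs L ++ (L.getLastD 0, R.headD 0) :: pairs R := by
  induction L with
  | nil => exact absurd rfl hL
  | cons x t ih =>
      cases t with
      | nil =>
          simp only [List.nil_append, List.cons_append, pairs, List.getLastD]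
          exact pairs_cons x R hR
      | cons y s =>
          have ht : (y :: s : List Int) ≠ [] := by simp
          have e : (x :: y :: s ++ R : List Int) = x :: ((y :: s) ++ R) := by simp
          rw [e, pairs_cons x ((y :: s) ++ R) (by simp), pairs_cons x (y :: s) ht, ih ht]
          simp [List.getLastD]

theorem surf_append (L R : List Int) (hL : L ≠ []) (hR : R ≠ []) :
    surf (L ++ R) = surf L + surf R - (6 - (6 - pairW (L.getLastD 0, R.headD 0))) := by
  unfold surf
  rw [pairs_append L R hL hR]
  simp [List.map_append]
  ring

theorem calc_x_alt_surf : ∀ (n : Nat) (xs : List Int), xs.length ≤ n → calc_x_alt xs = surf xs := by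
  intro n
  induction n with
  | zero =>
      intro xs h
      have : xs = [] := List.eq_nil_of_length_eq_zero (Nat.le_zero.mp h)
      subst this
      simp [calc_x_alt, surf, pairs]
  | succ n ih =>
      intro xs h
      rw [calc_x_alt]
      by_cases h1 : xs.length ≤ 1
      · rw [if_pos h1]
        interval_cases hl : xs.length
        · have : xs = [] := List.eq_nil_of_length_eq_zero hl
          subst this; simp [surf, pairs]
        · match xs, hl with
          | [x], _ => simp [surf, pairs]
      · rw [if_neg h1]
        have h2 : 2 ≤ xs.length := by omega
        show calc_x_alt (xs.take (xs.length / 2)) + calc_x_alt (xs.drop (xs.length / 2)) -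
            (if ((xs.take (xs.length / 2)).getLastD 0 - (xs.drop (xs.length / 2)).headD 0).natAbs = 0 then (6 : Int)
             else if ((xs.take (xs.length / 2)).getLastD 0 - (xs.drop (xs.length / 2)).headD 0).natAbs = 1 then 2 else 0)
          = surf xs
        set mid := xs.length / 2 with hmid
        have hmid1 : 1 ≤ mid := by omega
        have hmidlt : mid < xs.length := by omega
        have hLlen : (xs.take mid).length = mid := by simp; omega
        have hRlen : (xs.drop mid).length = xs.length - mid := by simp
        have hLne : xs.take mid ≠ [] := by
          intro hc; rw [hc] at hLlen; simp at hLlen; omega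
        have hRne : xs.drop mid ≠ [] := by
          intro hc; rw [hc] at hRlen; simp at hRlen; omega
        have ihL := ih (xs.take mid) (by omega)
        have ihR := ih (xs.drop mid) (by omega)
        rw [ihL, ihR]
        have hsplit := surf_append (xs.take mid) (xs.drop mid) hLne hRne
        rw [List.take_append_drop] at hsplit
        rw [hsplit]
        simp only [pairW]
        split_ifs <;> ring

theorem pairs_eq_zip : ∀ xs : List Int, pairs xs = xs.zip xs.tail := by
  intro xs
  induction xs with
  | nil => simp [pairs]
  | cons x t ih =>
      cases t with
      | nil => simp [pairs]
      | cons y s => simp [pairs, ih]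

-- A's loop body, expressed on a pair
def stepA (acc : Int) (p : Int × Int) : Int :=
  let acc := acc + 6
  if (p.1 - p.2).natAbs = 0 then acc - 6
  else if (p.1 - p.2).natAbs = 1 then acc - 2
  else acc

theorem stepA_eq (acc : Int) (p : Int × Int) : stepA acc p = acc + (6 - pairW p) := by
  simp only [stepA, pairW]
  split_ifs <;> omega

theorem foldl_stepA (l : List (Int × Int)) (c : Int) :
    l.foldl stepA c = c + (l.map (fun p => 6 - pairW p)).sum := by
  induction l generalizing c with
  | nil => simp
  | cons p t ih => simp only [List.foldl_cons, List.map_cons, List.sum_cons, ih, stepA_eq]; ring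

theorem range_map_pairs (xs : List Int) :
    (PySem.List.pyRange 0 ((xs.length : Int) - 1) 1).map
      (fun i => (PySem.List.pyGetD xs i 0, PySem.List.pyGetD xs (i + 1) 0))
      = xs.zip xs.tail := by
  rw [PySem.List.pyRange_one]
  have hlen : ((xs.length : Int) - 1 - 0).toNat = xs.length - 1 := by omega
  rw [List.map_map]
  apply List.ext_getElem
  · simp [List.length_zip, List.length_tail]
  · intro k h1 h2
    simp only [List.length_map, List.length_range, hlen] at h1
    have hk1 : k + 1 < xs.length := by omega
    have hk : k < xs.length := by omega
    simp only [List.getElem_map, List.getElem_range, Function.comp_apply, List.getElem_zip,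
      List.getElem_tail]
    have e1 : (0 : Int) + (k : Int) = (k : Int) := by ring
    rw [e1]
    have g1 : PySem.List.pyGetD xs (k : Int) 0 = xs[k] := by
      rw [PySem.List.pyGetD_natCast]; simp [hk]
    have g2 : PySem.List.pyGetD xs ((k : Int) + 1) 0 = xs[k + 1] := by
      have : ((k : Int) + 1) = ((k + 1 : Nat) : Int) := by push_cast; ring
      rw [this, PySem.List.pyGetD_natCast]; simp [hk1]
    rw [g1, g2]

theorem calc_x_surf (xs : List Int) : calc_x xs = surf xs := by
  unfold calc_x
  by_cases h1 : xs.length = 1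
  · rw [if_pos h1]
    match xs, h1 with
    | [x], _ => simp [surf, pairs]
  · rw [if_neg h1]
    have key := foldl_stepA ((PySem.List.pyRange 0 ((xs.length : Int) - 1) 1).map
      (fun i => (PySem.List.pyGetD xs i 0, PySem.List.pyGetD xs (i + 1) 0))) 6
    rw [List.foldl_map, range_map_pairs] at key
    unfold surf
    rw [pairs_eq_zip]
    exact key

-- ===== VERDICT (by name: the statement is the Claim_ definition above) =====
theorem calc_x_spec : Claim_equal_calc_x := by
  intro xs _
  unfold Spec_calc_x
  rw [calc_x_surf, calc_x_alt_surf xs.length xs le_rfl]
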